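-- pv_equiv track=rewrite | github.com/anthonydawa/axie-manager-tools | market_order.py | count_decimal
-- ===== SOURCE A (Python) =====
-- def count_decimal(num):
--     str_num = str(num)
--     count = 0
--     for d in str_num:
--         if d == '0':
--             count += 1
--         elif d == '.':
--             pass
--         elif d == '1':
--             break
--     return count
-- ===== SOURCE B (Python) =====
-- def count_decimal(num):
--     acc = 0
--     for c in reversed(str(num)):
--         if c == '0':
--             acc += 1
--         elif c == '1':
--             acc = 0
--     return acc
-- ===== Notes on version B (the rewrite author's own statement) =====
-- stated objective: alternative
-- what changed: Replaces A's forward loop with early break by a single right-to-left fold whose accumulator counts zeros and resets to 0 at every '1', so the final value is the zeros before the first '1' without any break or search.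
import Mathlib
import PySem

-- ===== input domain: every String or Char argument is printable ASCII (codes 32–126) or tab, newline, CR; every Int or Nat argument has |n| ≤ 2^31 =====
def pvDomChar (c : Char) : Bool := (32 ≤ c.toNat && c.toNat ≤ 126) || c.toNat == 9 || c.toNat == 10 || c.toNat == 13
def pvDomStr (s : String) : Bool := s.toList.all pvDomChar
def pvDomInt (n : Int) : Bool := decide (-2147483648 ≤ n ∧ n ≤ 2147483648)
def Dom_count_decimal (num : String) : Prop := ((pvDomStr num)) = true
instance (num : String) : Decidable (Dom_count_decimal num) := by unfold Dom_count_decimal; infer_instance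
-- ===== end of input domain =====

-- B replaces A's forward loop with break by a right-to-left fold whose accumulator resets at '1' (objective: alternative).

-- ===== PORT A =====
-- the for-loop with break, as structural recursion over the characters
def countDecimalLoop : List Char → Int → Int
  | [], count => count
  | d :: rest, count =>
    if d = '0' then countDecimalLoop rest (count + 1)
    else if d = '.' then countDecimalLoop rest count
    else if d = '1' then count
    else countDecimalLoop rest count

def count_decimal (num : String) : Int := countDecimalLoop num.toList 0

-- ===== PORT B =====
-- one step of B's backward scan: increment on '0', reset on '1'
def countAltStep (acc : Int) (c : Char) : Int :=
  if c = '0' then acc + 1 else if c = '1' then 0 else acc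

def count_decimal_alt (num : String) : Int :=
  num.toList.reverse.foldl countAltStep 0

-- ===== PRECONDITION & SPEC =====
def Spec_count_decimal (num : String) (out : Int) : Prop := out = count_decimal_alt num
instance (num : String) (out : Int) : Decidable (Spec_count_decimal num out) := by unfold Spec_count_decimal; infer_instance

-- ===== CLAIM (what is proved, stated in full; the proofs are below) =====
def Claim_equal_count_decimal : Prop := ∀ (num : String), Dom_count_decimal num → Spec_count_decimal num (count_decimal num)

-- ===== LEMMAS AND PROOFS =====

-- B's backward fold satisfies the left-cons recurrence of "zeros before the first '1'"
theorem altFold_cons (d : Char) (t : List Char) :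
    (d :: t).reverse.foldl countAltStep 0 = countAltStep (t.reverse.foldl countAltStep 0) d := by
  rw [List.reverse_cons, List.foldl_append]
  rfl

-- both programs compute the count of '0' in the prefix before the first '1'
theorem altFold_eq (cs : List Char) :
    cs.reverse.foldl countAltStep 0 = ((cs.takeWhile (fun x => !(x == '1'))).count '0' : Int) := by
  induction cs with
  | nil => simp
  | cons d t ih =>
    rw [altFold_cons, ih, List.takeWhile_cons, countAltStep]
    by_cases h0 : d = '0'
    · subst h0; simp
    · by_cases h1 : d = '1'
      · subst h1; simp
      · have hb : (d == '1') = false := by simp [h1]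
        rw [if_neg h0, if_neg h1]
        simp only [hb, Bool.not_false, if_true, List.count_cons]
        have : (d == '0') = false := by simp [h0]
        simp [this]

theorem countLoop_eq (cs : List Char) (acc : Int) :
    countDecimalLoop cs acc = acc + ((cs.takeWhile (fun x => !(x == '1'))).count '0' : Int) := by
  induction cs generalizing acc with
  | nil => simp [countDecimalLoop]
  | cons d t ih =>
    rw [countDecimalLoop, List.takeWhile_cons]
    by_cases h1 : d = '1'
    · subst h1
      simp [countDecimalLoop]
    · have hb : (d == '1') = false := by simp [h1]
      simp only [hb, Bool.not_false, if_true]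
      by_cases h0 : d = '0'
      · subst h0
        rw [if_pos rfl, ih, List.count_cons_self]
        push_cast; ring
      · rw [if_neg h0]
        have hrec : (if d = '.' then countDecimalLoop t acc
            else if d = '1' then acc else countDecimalLoop t acc) = countDecimalLoop t acc := by
          split_ifs <;> simp_all
        rw [hrec, ih]
        have hc : List.count '0' (d :: List.takeWhile (fun x => !(x == '1')) t)
            = List.count '0' (List.takeWhile (fun x => !(x == '1')) t) := by
          rw [List.count_cons]
          simp
          intro h'
          exact absurd h' h0
        rw [hc]

-- ===== VERDICT (by name: the statement is the Claim_ definition above) =====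
theorem count_decimal_spec : Claim_equal_count_decimal := by
  intro num _
  unfold Spec_count_decimal count_decimal count_decimal_alt
  rw [countLoop_eq, altFold_eq]
  ring
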